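-- pv_equiv track=rewrite | github.com/Miracle-cl/Algorithms | vector/MinMoveMakeArrayComplementary.py | minMoves_TLE
-- ===== SOURCE A (Python) =====
-- from typing import List
--
-- def minMoves_TLE(nums: List[int], limit: int) -> int:
--     # TLE
--     n = len(nums)
--     ab = []
--     for i in range((n+1)//2):
--         if nums[i] <= nums[n-i-1]:
--             ab.append((nums[i], nums[n-i-1]))
--         else:
--             ab.append((nums[n-i-1], nums[i]))
--
--     ans = n
--     for t in range(2, 2*limit + 1):
--         tmp = 0
--         for a, b in ab:
--             if t == a + b:
--                 continue
--             if a + 1 <= t < b + limit + 1: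
--                 tmp += 1
--             else:
--                 tmp += 2
--         ans = min(ans, tmp)
--
--     return ans
-- ===== SOURCE B (Python) =====
-- from typing import List
--
-- def minMoves_TLE(nums: List[int], limit: int) -> int:
--     # Candidate-target enumeration: the per-target cost only changes at the
--     # breakpoints a+1, a+b, a+b+1, b+limit+1 of each pair, so the minimum over
--     # all targets t in [2, 2*limit] is attained at t=2 or at a breakpoint.
--     n = len(nums)
--     ab = []
--     for i in range((n + 1) // 2):
--         a, b = nums[i], nums[n - i - 1]
--         ab.append((a, b) if a <= b else (b, a))
--
--     lo, hi = 2, 2 * limit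
--     ans = n
--     if lo <= hi:
--         cands = [lo]
--         for a, b in ab:
--             for t in (a + 1, a + b, a + b + 1, b + limit + 1):
--                 if lo <= t <= hi:
--                     cands.append(t)
--         for t in cands:
--             cost = 0
--             for a, b in ab:
--                 if t != a + b:
--                     cost += 1 if a + 1 <= t <= b + limit else 2
--             ans = min(ans, cost)
--     return ans
-- ===== Notes on version B (the rewrite author's own statement) =====
-- stated objective: faster
-- what changed: Instead of scanning every target sum t in [2, 2*limit] and recomputing the cost for each (O(n*limit)), B evaluates the cost only at the finitely many breakpoints (a+1, a+b, a+b+1, b+limit+1 per pair) where the piecewise-constant cost function can change, so the work depends on n only, not on limit.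
import Mathlib
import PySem

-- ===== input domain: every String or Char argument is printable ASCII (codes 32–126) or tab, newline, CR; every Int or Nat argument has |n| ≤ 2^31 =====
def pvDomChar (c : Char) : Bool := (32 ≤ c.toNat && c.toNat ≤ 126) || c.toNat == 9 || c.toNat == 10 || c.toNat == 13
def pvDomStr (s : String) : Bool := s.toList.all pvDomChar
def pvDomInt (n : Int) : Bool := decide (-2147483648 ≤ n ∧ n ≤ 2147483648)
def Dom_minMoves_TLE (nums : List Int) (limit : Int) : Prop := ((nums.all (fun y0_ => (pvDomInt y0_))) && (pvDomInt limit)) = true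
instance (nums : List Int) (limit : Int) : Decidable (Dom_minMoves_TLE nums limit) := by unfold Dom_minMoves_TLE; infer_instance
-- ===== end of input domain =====

-- B replaces A's scan over every target sum t in [2, 2*limit] by an evaluation at the
-- finitely many breakpoints where the per-pair cost changes; objective: faster (asymptotic).

-- ===== PORT A =====
-- indices i and n-i-1 are always in range (0 ≤ i < (n+1)//2), so pyGetD's default is never used
def minMoves_TLE (nums : List Int) (limit : Int) : Int :=
  let n : Int := nums.length
  let ab : List (Int × Int) :=
    (PySem.List.pyRange 0 (PySem.Int.floordiv (n + 1) 2) 1).foldl (fun ab i =>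
      if PySem.List.pyGetD nums i 0 ≤ PySem.List.pyGetD nums (n - i - 1) 0 then
        ab ++ [(PySem.List.pyGetD nums i 0, PySem.List.pyGetD nums (n - i - 1) 0)]
      else
        ab ++ [(PySem.List.pyGetD nums (n - i - 1) 0, PySem.List.pyGetD nums i 0)]) []
  (PySem.List.pyRange 2 (2 * limit + 1) 1).foldl (fun ans t =>
    let tmp := ab.foldl (fun tmp p =>
      if t = p.1 + p.2 then tmp
      else if p.1 + 1 ≤ t ∧ t < p.2 + limit + 1 then tmp + 1
      else tmp + 2) 0
    min ans tmp) n

-- ===== PORT B =====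
def minMoves_TLE_alt (nums : List Int) (limit : Int) : Int :=
  let n : Int := nums.length
  let ab : List (Int × Int) :=
    (PySem.List.pyRange 0 (PySem.Int.floordiv (n + 1) 2) 1).foldl (fun ab i =>
      let a := PySem.List.pyGetD nums i 0
      let b := PySem.List.pyGetD nums (n - i - 1) 0
      ab ++ [if a ≤ b then (a, b) else (b, a)]) []
  let lo : Int := 2
  let hi : Int := 2 * limit
  if lo ≤ hi then
    let cands : List Int := ab.foldl (fun cs p =>
      [p.1 + 1, p.1 + p.2, p.1 + p.2 + 1, p.2 + limit + 1].foldl (fun cs t =>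
        if lo ≤ t ∧ t ≤ hi then cs ++ [t] else cs) cs) [lo]
    cands.foldl (fun ans t =>
      let cost := ab.foldl (fun cost p =>
        if t ≠ p.1 + p.2 then cost + (if p.1 + 1 ≤ t ∧ t ≤ p.2 + limit then 1 else 2)
        else cost) 0
      min ans cost) n
  else n

-- ===== PRECONDITION & SPEC =====
def Spec_minMoves_TLE (nums : List Int) (limit : Int) (out : Int) : Prop := out = minMoves_TLE_alt nums limit
instance (nums : List Int) (limit : Int) (out : Int) : Decidable (Spec_minMoves_TLE nums limit out) := by unfold Spec_minMoves_TLE; infer_instance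

-- ===== CLAIM (what is proved, stated in full; the proofs are below) =====
def Claim_equal_minMoves_TLE : Prop := ∀ (nums : List Int) (limit : Int), Dom_minMoves_TLE nums limit → Spec_minMoves_TLE nums limit (minMoves_TLE nums limit)

-- ===== LEMMAS AND PROOFS =====

-- per-pair cost of target t (A's inner-loop contribution)
def pvG (L : Int) (p : Int × Int) (t : Int) : Int :=
  if t = p.1 + p.2 then 0 else if p.1 + 1 ≤ t ∧ t < p.2 + L + 1 then 1 else 2

def pvCost (L : Int) (ab : List (Int × Int)) (t : Int) : Int :=
  (ab.map (fun p => pvG L p t)).sum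

def pvPts (L : Int) (p : Int × Int) : List Int :=
  [p.1 + 1, p.1 + p.2, p.1 + p.2 + 1, p.2 + L + 1]

def pvCands (L : Int) (ab : List (Int × Int)) : List Int :=
  [2] ++ ab.flatMap (fun p => (pvPts L p).filter (fun t => decide (2 ≤ t ∧ t ≤ 2 * L)))

def pvFoldMin (f : Int → Int) (init : Int) (l : List Int) : Int :=
  l.foldl (fun a t => min a (f t)) init

lemma pvCostA_fold (L t : Int) (ab : List (Int × Int)) (acc : Int) :
    ab.foldl (fun tmp p =>
      if t = p.1 + p.2 then tmp
      else if p.1 + 1 ≤ t ∧ t < p.2 + L + 1 then tmp + 1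
      else tmp + 2) acc = acc + pvCost L ab t := by
  induction ab generalizing acc with
  | nil => simp [pvCost]
  | cons p ab ih =>
    have hstep : (if t = p.1 + p.2 then acc
        else if p.1 + 1 ≤ t ∧ t < p.2 + L + 1 then acc + 1
        else acc + 2) = acc + pvG L p t := by
      unfold pvG; split_ifs <;> omega
    rw [List.foldl_cons, hstep, ih]
    simp only [pvCost, List.map_cons, List.sum_cons]
    ring

lemma pvCostB_fold (L t : Int) (ab : List (Int × Int)) (acc : Int) :
    ab.foldl (fun cost p =>
      if t ≠ p.1 + p.2 then cost + (if p.1 + 1 ≤ t ∧ t ≤ p.2 + L then 1 else 2)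
      else cost) acc = acc + pvCost L ab t := by
  induction ab generalizing acc with
  | nil => simp [pvCost]
  | cons p ab ih =>
    have hstep : (if t ≠ p.1 + p.2 then acc + (if p.1 + 1 ≤ t ∧ t ≤ p.2 + L then 1 else 2)
        else acc) = acc + pvG L p t := by
      unfold pvG; split_ifs <;> omega
    rw [List.foldl_cons, hstep, ih]
    simp only [pvCost, List.map_cons, List.sum_cons]
    ring

lemma pvG_step (L t : Int) (p : Int × Int)
    (h1 : t ≠ p.1 + 1) (h2 : t ≠ p.1 + p.2) (h3 : t ≠ p.1 + p.2 + 1) (h4 : t ≠ p.2 + L + 1) :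
    pvG L p t = pvG L p (t - 1) := by
  unfold pvG
  split_ifs <;> omega

lemma pvCost_step (L t : Int) (ab : List (Int × Int))
    (h : ∀ p ∈ ab, t ∉ pvPts L p) :
    pvCost L ab t = pvCost L ab (t - 1) := by
  induction ab with
  | nil => simp [pvCost]
  | cons p ab ih =>
    have hp : t ≠ p.1 + 1 ∧ t ≠ p.1 + p.2 ∧ t ≠ p.1 + p.2 + 1 ∧ t ≠ p.2 + L + 1 := by
      have := h p (by simp)
      simp only [pvPts, List.mem_cons, List.not_mem_nil] at this
      tauto
    have hr := ih (fun q hq => h q (List.mem_cons_of_mem _ hq))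
    simp only [pvCost, List.map_cons, List.sum_cons] at hr ⊢
    rw [pvG_step L t p hp.1 hp.2.1 hp.2.2.1 hp.2.2.2, hr]

lemma mem_pvCands (L x : Int) (ab : List (Int × Int)) :
    x ∈ pvCands L ab ↔ x = 2 ∨ ∃ p ∈ ab, x ∈ pvPts L p ∧ 2 ≤ x ∧ x ≤ 2 * L := by
  simp [pvCands, List.mem_flatMap, List.mem_filter]

lemma pvFoldMin_le_init (f : Int → Int) (init : Int) (l : List Int) :
    pvFoldMin f init l ≤ init := by
  induction l generalizing init with
  | nil => simp [pvFoldMin]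
  | cons t l ih =>
    calc pvFoldMin f (min init (f t)) l ≤ min init (f t) := ih _
    _ ≤ init := min_le_left _ _

lemma pvFoldMin_le_mem (f : Int → Int) (l : List Int) (t : Int) :
    ∀ init, t ∈ l → pvFoldMin f init l ≤ f t := by
  induction l with
  | nil => intro _ h; simp at h
  | cons s l ih =>
    intro init h
    simp only [pvFoldMin, List.foldl_cons]
    rcases List.mem_cons.1 h with rfl | h
    · calc pvFoldMin f (min init (f t)) l ≤ min init (f t) := pvFoldMin_le_init _ _ _
      _ ≤ f t := min_le_right _ _
    · exact ih _ h

lemma le_pvFoldMin (f : Int → Int) (m : Int) (l : List Int) :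
    ∀ init, m ≤ init → (∀ t ∈ l, m ≤ f t) → m ≤ pvFoldMin f init l := by
  induction l with
  | nil => intro init h0 _; simpa [pvFoldMin] using h0
  | cons t l ih =>
    intro init h0 h
    simp only [pvFoldMin, List.foldl_cons]
    exact ih _ (le_min h0 (h t (by simp))) (fun s hs => h s (List.mem_cons_of_mem _ hs))

-- every target in [2, 2L] has a candidate with the same cost
lemma pvExists_cand (L : Int) (ab : List (Int × Int)) :
    ∀ (k : Nat) (t : Int), t = 2 + (k : Int) → t ≤ 2 * L →
      ∃ t' ∈ pvCands L ab, pvCost L ab t' = pvCost L ab t := by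
  intro k
  induction k with
  | zero =>
    intro t ht _
    exact ⟨t, by rw [mem_pvCands]; left; omega, rfl⟩
  | succ k ih =>
    intro t ht hle
    by_cases hc : t ∈ pvCands L ab
    · exact ⟨t, hc, rfl⟩
    · have hnot : ∀ p ∈ ab, t ∉ pvPts L p := by
        intro p hp hmem
        exact hc ((mem_pvCands L t ab).2 (Or.inr ⟨p, hp, hmem, by omega, hle⟩))
      obtain ⟨t', ht', he⟩ := ih (t - 1) (by omega) (by omega)
      exact ⟨t', ht', by rw [he, ← pvCost_step L t ab hnot]⟩

-- the core equality, over an abstract pair list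
lemma pvMain (L n : Int) (ab : List (Int × Int)) :
    pvFoldMin (pvCost L ab) n (PySem.List.pyRange 2 (2 * L + 1) 1)
      = if (2 : Int) ≤ 2 * L then pvFoldMin (pvCost L ab) n (pvCands L ab) else n := by
  by_cases hL : (2 : Int) ≤ 2 * L
  · rw [if_pos hL]
    apply le_antisymm
    · apply le_pvFoldMin _ _ _ _ (pvFoldMin_le_init _ _ _)
      intro t ht
      apply pvFoldMin_le_mem
      rw [PySem.List.mem_pyRange_one]
      rcases (mem_pvCands L t ab).1 ht with rfl | ⟨p, _, _, h2, h3⟩ <;> omega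
    · apply le_pvFoldMin _ _ _ _ (pvFoldMin_le_init _ _ _)
      intro t ht
      rw [PySem.List.mem_pyRange_one] at ht
      obtain ⟨t', ht', he⟩ := pvExists_cand L ab (t - 2).toNat t (by omega) (by omega)
      calc pvFoldMin (pvCost L ab) n (pvCands L ab) ≤ pvCost L ab t' := pvFoldMin_le_mem _ _ _ _ ht'
      _ = pvCost L ab t := he
  · rw [if_neg hL, PySem.List.pyRange_one_eq_nil (by omega)]
    simp [pvFoldMin]

-- the two ports build the same pair list
lemma pvAB_eq (nums : List Int) :
    (PySem.List.pyRange 0 (PySem.Int.floordiv ((nums.length : Int) + 1) 2) 1).foldl (fun ab i =>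
      if PySem.List.pyGetD nums i 0 ≤ PySem.List.pyGetD nums ((nums.length : Int) - i - 1) 0 then
        ab ++ [(PySem.List.pyGetD nums i 0, PySem.List.pyGetD nums ((nums.length : Int) - i - 1) 0)]
      else
        ab ++ [(PySem.List.pyGetD nums ((nums.length : Int) - i - 1) 0, PySem.List.pyGetD nums i 0)]) []
    = (PySem.List.pyRange 0 (PySem.Int.floordiv ((nums.length : Int) + 1) 2) 1).foldl (fun ab i =>
      let a := PySem.List.pyGetD nums i 0
      let b := PySem.List.pyGetD nums ((nums.length : Int) - i - 1) 0
      ab ++ [if a ≤ b then (a, b) else (b, a)]) [] := by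
  apply PySem.List.foldl_congr_mem
  intro acc i _
  by_cases h : PySem.List.pyGetD nums i 0 ≤ PySem.List.pyGetD nums ((nums.length : Int) - i - 1) 0 <;>
    simp [h]

-- B's candidate list is pvCands
lemma pvCands_eq (L : Int) (ab : List (Int × Int)) :
    ab.foldl (fun cs p =>
      [p.1 + 1, p.1 + p.2, p.1 + p.2 + 1, p.2 + L + 1].foldl (fun cs t =>
        if (2 : Int) ≤ t ∧ t ≤ 2 * L then cs ++ [t] else cs) cs) [2]
    = pvCands L ab := by
  have hinner : ∀ (cs : List Int) (p : Int × Int),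
      [p.1 + 1, p.1 + p.2, p.1 + p.2 + 1, p.2 + L + 1].foldl (fun cs t =>
        if (2 : Int) ≤ t ∧ t ≤ 2 * L then cs ++ [t] else cs) cs
      = cs ++ (pvPts L p).filter (fun t => decide (2 ≤ t ∧ t ≤ 2 * L)) := by
    intro cs p
    have := PySem.List.foldl_append_if (fun t => decide ((2 : Int) ≤ t ∧ t ≤ 2 * L))
      (id : Int → Int) (pvPts L p) cs
    simpa [pvPts] using this
  rw [PySem.List.foldl_congr_mem ab _ (fun cs p => cs ++ (pvPts L p).filter (fun t => decide (2 ≤ t ∧ t ≤ 2 * L))) _ (fun cs p _ => hinner cs p),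
      PySem.List.foldl_append_eq_flatMap]
  rfl

-- ===== VERDICT (by name: the statement is the Claim_ definition above) =====
theorem minMoves_TLE_spec : Claim_equal_minMoves_TLE := by
  intro nums limit _
  show minMoves_TLE nums limit = minMoves_TLE_alt nums limit
  simp only [minMoves_TLE, minMoves_TLE_alt]
  rw [pvAB_eq]
  set ab := (PySem.List.pyRange 0 (PySem.Int.floordiv ((nums.length : Int) + 1) 2) 1).foldl (fun ab i =>
      let a := PySem.List.pyGetD nums i 0
      let b := PySem.List.pyGetD nums ((nums.length : Int) - i - 1) 0
      ab ++ [if a ≤ b then (a, b) else (b, a)]) [] with hab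
  have hA : (PySem.List.pyRange 2 (2 * limit + 1) 1).foldl (fun ans t =>
      min ans (ab.foldl (fun tmp p =>
        if t = p.1 + p.2 then tmp
        else if p.1 + 1 ≤ t ∧ t < p.2 + limit + 1 then tmp + 1
        else tmp + 2) 0)) (nums.length : Int)
      = pvFoldMin (pvCost limit ab) (nums.length : Int) (PySem.List.pyRange 2 (2 * limit + 1) 1) := by
    unfold pvFoldMin
    apply PySem.List.foldl_congr_mem
    intro acc t _
    rw [pvCostA_fold]
    norm_num
  rw [hA, pvMain]
  by_cases hL : (2 : Int) ≤ 2 * limit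
  · rw [if_pos hL, if_pos hL, pvCands_eq]
    unfold pvFoldMin
    apply (PySem.List.foldl_congr_mem _ _ _ _ _).symm
    intro acc t _
    rw [pvCostB_fold]
    norm_num
  · rw [if_neg hL, if_neg hL]
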